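-- pv_equiv track=rewrite | github.com/SokolowskiMik/pp1 | 13-Test3/p1.py | f
-- ===== SOURCE A (Python) =====
-- def f(n):
--     lst = []
--     if n > 0:
--         whole = n//5
--         rest = n - (whole*5)
--         for i in range(whole):
--             lst.append('/'*5)
--         if rest > 0:
--             lst.append('/'*rest)
--         return '-'.join(lst)
--     else:
--         return ''
-- ===== SOURCE B (Python) =====
-- def f(n):
--     s = '/' * n
--     return '-'.join(s[i:i+5] for i in range(0, len(s), 5))
-- ===== Notes on version B (the rewrite author's own statement) =====
-- stated objective: simpler
-- what changed: B builds the full slash string '/'*n once and slices it into successive 5-character chunks over range(0, len(s), 5), replacing A's whole/rest division arithmetic and the two-branch list construction.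
import Mathlib
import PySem

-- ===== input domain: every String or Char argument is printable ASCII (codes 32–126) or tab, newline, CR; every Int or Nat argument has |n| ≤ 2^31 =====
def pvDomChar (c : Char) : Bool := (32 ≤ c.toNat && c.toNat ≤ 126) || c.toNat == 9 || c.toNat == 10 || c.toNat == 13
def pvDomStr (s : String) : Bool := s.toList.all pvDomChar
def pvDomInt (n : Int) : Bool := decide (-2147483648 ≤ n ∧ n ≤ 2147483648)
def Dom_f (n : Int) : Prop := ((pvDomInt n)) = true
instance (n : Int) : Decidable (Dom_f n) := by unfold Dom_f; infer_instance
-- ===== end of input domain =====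

-- B is simpler: it builds the full slash string once and chunks it by slicing,
-- instead of A's whole/rest division arithmetic with a separate remainder branch.

-- ===== PORT A =====
def f (n : Int) : String :=
  if n > 0 then
    let whole := PySem.Int.floordiv n 5
    let rest := n - whole * 5
    let lst : List String :=
      (PySem.List.pyRange 0 whole 1).map (fun _ => String.ofList (PySem.List.pyRepeat ['/'] 5))
    let lst := if rest > 0 then lst ++ [String.ofList (PySem.List.pyRepeat ['/'] rest)] else lst
    PySem.Str.join "-" lst
  else
    ""

-- ===== PORT B =====
def f_alt (n : Int) : String :=
  let s := String.ofList (PySem.List.pyRepeat ['/'] n)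
  PySem.Str.join "-"
    ((PySem.List.pyRange 0 (PySem.Str.len s) 5).map
      (fun i => PySem.Str.slice s (some i) (some (i + 5))))

-- ===== PRECONDITION & SPEC =====
def Spec_f (n : Int) (out : String) : Prop := out = f_alt n
instance (n : Int) (out : String) : Decidable (Spec_f n out) := by unfold Spec_f; infer_instance

-- ===== CLAIM (what is proved, stated in full; the proofs are below) =====
def Claim_equal_f : Prop := ∀ (n : Int), Dom_f n → Spec_f n (f n)

-- ===== LEMMAS AND PROOFS =====

-- ===== VERDICT (by name: the statement is the Claim_ definition above) =====
theorem f_spec : Claim_equal_f := by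
  unfold Claim_equal_f Spec_f f f_alt
  intro n _
  by_cases hn : n > 0
  · rw [if_pos hn]
    obtain ⟨m, rfl⟩ : ∃ m : Nat, n = (m : Int) := ⟨n.toNat, by omega⟩
    have hm0 : 0 < m := by exact_mod_cast hn
    have hdm : m / 5 * 5 + m % 5 = m := by omega
    have hr5 : m % 5 < 5 := Nat.mod_lt m (by norm_num)
    -- A's whole and rest
    have hw : PySem.Int.floordiv (m : Int) 5 = ((m / 5 : Nat) : Int) := by
      exact_mod_cast PySem.Int.floordiv_natCast m 5
    have hrest : (m : Int) - ((m / 5 : Nat) : Int) * 5 = ((m % 5 : Nat) : Int) := by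
      push_cast; omega
    -- zeta-reduce the lets, rewrite whole/rest, unfold the repeats
    simp only [hw, hrest, PySem.List.pyRepeat_singleton, Int.toNat_natCast]
    have hlen : PySem.Str.len (String.ofList (List.replicate m '/')) = (m : Int) := by
      rw [PySem.Str.len_eq]; simp
    rw [hlen, PySem.List.pyRange_of_pos 0 (m : Int) (by norm_num : (0:Int) < 5)]
    have hcnt : (if (0:Int) < (m:Int) then (((m:Int) - 0 + 5 - 1) / 5).toNat else 0)
        = (m + 4) / 5 := by
      rw [if_pos (by exact_mod_cast hm0)]
      have h4 : ((m:Int) - 0 + 5 - 1) / 5 = (((m + 4) / 5 : Nat) : Int) := by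
        push_cast; omega
      rw [h4, Int.toNat_natCast]
    rw [hcnt]
    -- B's slices of the replicate string
    have hslice : ∀ k : Nat,
        PySem.Str.slice (String.ofList (List.replicate m '/')) (some (0 + 5 * (k:Int)))
            (some (0 + 5 * (k:Int) + 5))
          = String.ofList (((List.replicate m '/').drop (5 * k)).take 5) := by
      intro k
      have h1 : (0 + 5 * (k:Int)) = ((5 * k : Nat) : Int) := by push_cast; ring
      have h2 : (0 + 5 * (k:Int) + 5) = ((5 * k : Nat) : Int) + ((5:Nat) : Int) := by
        push_cast; ring
      have : (PySem.Str.slice (String.ofList (List.replicate m '/'))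
          (some ((5 * k : Nat) : Int)) (some (((5 * k : Nat) : Int) + ((5:Nat) : Int)))).toList
          = ((List.replicate m '/').drop (5 * k)).take 5 := by
        rw [PySem.Str.toList_slice, PySem.Chars.slice, String.toList_ofList,
          PySem.List.slice_natCast_add]
      rw [h2, h1, ← @String.ofList_toList (PySem.Str.slice (String.ofList (List.replicate m '/')) (some ((5 * k : Nat) : Int)) (some (((5 * k : Nat) : Int) + ((5:Nat) : Int)))), this]
    rw [List.map_map]
    simp only [Function.comp_def, hslice]
    -- A's list of full chunks
    rw [PySem.List.pyRange_one]
    simp only [Int.sub_zero, Int.toNat_natCast, List.map_map]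
    norm_num
    -- split on the remainder
    by_cases hr : m % 5 = 0
    · rw [if_neg (show ¬ (0:Int) < (m:Int) % 5 by omega)]
      have hc : (m + 4) / 5 = m / 5 := by omega
      rw [hc]
      congr 1
      apply List.ext_getElem (by simp)
      intro k h1 h2
      simp only [List.length_map, List.length_range] at h1
      simp only [List.getElem_map, List.getElem_range, Function.comp_apply]
      congr 2
      omega
    · rw [if_pos (show (0:Int) < (m:Int) % 5 by omega)]
      have hc : (m + 4) / 5 = m / 5 + 1 := by omega
      rw [hc, List.range_succ, List.map_append]
      congr 1
      congr 1
      · apply List.ext_getElem (by simp)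
        intro k h1 h2
        simp only [List.length_map, List.length_range] at h1
        simp only [List.getElem_map, List.getElem_range, Function.comp_apply]
        congr 2
        omega
      · simp only [List.map_cons, List.map_nil, List.cons.injEq, and_true]
        congr 2
        omega
  · rw [if_neg hn, PySem.List.pyRepeat_singleton]
    have h0 : n.toNat = 0 := by omega
    rw [h0]
    simp only [List.replicate_zero]
    have hlen : PySem.Str.len (String.ofList ([] : List Char)) = 0 := by
      rw [PySem.Str.len_eq]; simp
    rw [hlen, PySem.List.pyRange_of_pos 0 0 (by norm_num : (0:Int) < 5)]
    simp only [lt_irrefl, if_false, List.range_zero, List.map_nil]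
    rfl
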